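-- pv_equiv track=rewrite | github.com/smbursuc/AEA-Graph-Coloring | proiect/tabucol.py | f
-- ===== SOURCE A (Python) =====
-- def f(adjacency_matrix, color_matrix):
--     conflicts = 0
--     num_nodes = len(adjacency_matrix)
--     for i in range(num_nodes):
--         for j in range(i + 1, num_nodes):
--             if adjacency_matrix[i][j] and color_matrix[i] == color_matrix[j]:
--                 conflicts += 1
--     return conflicts  # Divide by 2 because each conflict is counted twice
-- ===== SOURCE B (Python) =====
-- def f(adjacency_matrix, color_matrix):
--     n = len(adjacency_matrix)
--     distinct_colors = []
--     for i in range(n):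
--         if color_matrix[i] not in distinct_colors:
--             distinct_colors.append(color_matrix[i])
--     conflicts = 0
--     for k in distinct_colors:
--         nodes = [i for i in range(n) if color_matrix[i] == k]
--         for a in range(len(nodes)):
--             for b in range(a + 1, len(nodes)):
--                 if adjacency_matrix[nodes[a]][nodes[b]]:
--                     conflicts += 1
--     return conflicts
-- ===== Notes on version B (the rewrite author's own statement) =====
-- stated objective: alternative
-- what changed: B first builds the list of distinct colors (first-occurrence order) and partitions the node indices by color, then counts edges only among index pairs inside each color class, instead of A's single nested scan over all pairs re-checking color equality.
-- outside the precondition, e.g. on f([[0, 0], [0, 0]], []): A returns 0, B raises IndexError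
import Mathlib
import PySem

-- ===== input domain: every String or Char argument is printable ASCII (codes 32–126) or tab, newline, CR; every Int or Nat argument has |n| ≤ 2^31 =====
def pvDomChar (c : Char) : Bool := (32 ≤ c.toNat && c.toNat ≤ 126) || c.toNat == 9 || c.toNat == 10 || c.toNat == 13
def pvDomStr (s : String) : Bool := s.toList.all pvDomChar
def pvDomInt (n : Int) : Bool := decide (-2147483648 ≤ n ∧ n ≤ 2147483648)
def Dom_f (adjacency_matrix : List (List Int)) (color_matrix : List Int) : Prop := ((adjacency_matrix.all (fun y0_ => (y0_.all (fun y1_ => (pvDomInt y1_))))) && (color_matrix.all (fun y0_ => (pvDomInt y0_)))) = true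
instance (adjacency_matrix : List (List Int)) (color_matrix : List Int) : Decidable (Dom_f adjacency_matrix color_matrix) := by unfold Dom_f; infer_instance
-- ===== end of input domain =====

-- B groups the nodes by color first, so the pair loop runs only inside each color class; same return value as A (alternative decomposition, not claimed faster).

-- ===== PORT A =====
-- Literal port of A's nested index loops.  All loop indices are the non-negative
-- in-range values range() produces, so `List.getD` is exact there; the out-of-range
-- accesses on which Python raises IndexError are excluded by Pre_f.
def f (adjacency_matrix : List (List Int)) (color_matrix : List Int) : Int :=
  let num_nodes := adjacency_matrix.length
  (List.range num_nodes).foldl (fun conflicts i =>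
    (List.range' (i + 1) (num_nodes - (i + 1))).foldl (fun conflicts j =>
      if ((adjacency_matrix.getD i []).getD j 0 != 0)
          && (color_matrix.getD i 0 == color_matrix.getD j 0)
      then conflicts + 1 else conflicts) conflicts) 0

-- ===== PORT B =====
-- Literal port of Source B: first-occurrence list of distinct colors, then per color
-- the list of nodes of that color, then the pair loop inside each color class.
def f_alt (adjacency_matrix : List (List Int)) (color_matrix : List Int) : Int :=
  let n := adjacency_matrix.length
  let distinct_colors := (List.range n).foldl
    (fun ks i => if color_matrix.getD i 0 ∈ ks then ks else ks ++ [color_matrix.getD i 0]) []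
  distinct_colors.foldl (fun conflicts k =>
    let nodes := (List.range n).filter (fun i => color_matrix.getD i 0 == k)
    (List.range nodes.length).foldl (fun conflicts a =>
      (List.range' (a + 1) (nodes.length - (a + 1))).foldl (fun conflicts b =>
        if (adjacency_matrix.getD (nodes.getD a 0) []).getD (nodes.getD b 0) 0 != 0
        then conflicts + 1 else conflicts) conflicts) conflicts) 0

-- ===== PRECONDITION & SPEC =====
-- Pre_f excludes ragged/short inputs (a row before the last shorter than the matrix,
-- or fewer colors than rows): there either program can hit IndexError, and whether A
-- returns depends only on short-circuiting over absent edges.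
def Pre_f (adjacency_matrix : List (List Int)) (color_matrix : List Int) : Prop :=
  (∀ row ∈ adjacency_matrix.dropLast, adjacency_matrix.length ≤ row.length) ∧
    adjacency_matrix.length ≤ color_matrix.length
instance (adjacency_matrix : List (List Int)) (color_matrix : List Int) : Decidable (Pre_f adjacency_matrix color_matrix) := by unfold Pre_f; infer_instance
def pvWitness_f : List (List Int) × List Int := ([[0, 1], [1, 0]], [1, 1])
def Spec_f (adjacency_matrix : List (List Int)) (color_matrix : List Int) (out : Int) : Prop := out = f_alt adjacency_matrix color_matrix
instance (adjacency_matrix : List (List Int)) (color_matrix : List Int) (out : Int) : Decidable (Spec_f adjacency_matrix color_matrix out) := by unfold Spec_f; infer_instance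

-- ===== CLAIM (what is proved, stated in full; the proofs are below) =====
def Claim_equal_f : Prop := ∀ (adjacency_matrix : List (List Int)) (color_matrix : List Int), Dom_f adjacency_matrix color_matrix → Pre_f adjacency_matrix color_matrix → Spec_f adjacency_matrix color_matrix (f adjacency_matrix color_matrix)

-- ===== LEMMAS AND PROOFS =====

/-- Number of pairs (a, b) with a before b in `l` satisfying `P`. -/
def pairCount (P : Nat → Nat → Bool) : List Nat → Nat
  | [] => 0
  | x :: xs => xs.countP (P x) + pairCount P xs

theorem foldl_if_count (Q : Nat → Bool) (l : List Nat) (acc : Int) :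
    l.foldl (fun a j => if Q j then a + 1 else a) acc = acc + (l.countP Q : Int) := by
  induction l generalizing acc with
  | nil => simp
  | cons x xs ih =>
      cases h : Q x
      · simp [List.foldl_cons, h, ih]
      · simp [List.foldl_cons, h, ih]
        ring_nf

theorem foldl_triangle (P : Nat → Nat → Bool) (n : Nat) :
    ∀ (m s : Nat) (acc : Int), s + m = n →
    (List.range' s m).foldl (fun acc i =>
        (List.range' (i + 1) (n - (i + 1))).foldl (fun acc j =>
          if P i j then acc + 1 else acc) acc) acc
      = acc + (pairCount P (List.range' s m) : Int) := by
  intro m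
  induction m with
  | zero => intro s acc _; simp [pairCount]
  | succ m ih =>
      intro s acc h
      have hm : n - (s + 1) = m := by omega
      rw [List.range'_succ, List.foldl_cons, foldl_if_count, ih (s + 1) _ (by omega)]
      simp [pairCount, hm]
      ring

theorem foldl_triangle_range (P : Nat → Nat → Bool) (n : Nat) (acc : Int) :
    (List.range n).foldl (fun acc i =>
        (List.range' (i + 1) (n - (i + 1))).foldl (fun acc j =>
          if P i j then acc + 1 else acc) acc) acc
      = acc + (pairCount P (List.range n) : Int) := by
  rw [List.range_eq_range']
  exact foldl_triangle P n n 0 acc (Nat.zero_add n)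

theorem countP_getD_range (xs : List Nat) (q : Nat → Bool) :
    (List.range xs.length).countP (fun a => q (xs.getD a 0)) = xs.countP q := by
  induction xs with
  | nil => simp
  | cons x xs ih =>
      rw [List.length_cons, List.range_succ_eq_map, List.countP_cons, List.countP_map]
      simp only [Function.comp_def, List.getD_cons_zero, List.getD_cons_succ]
      rw [ih, List.countP_cons]

theorem pairCount_map (P : Nat → Nat → Bool) (g : Nat → Nat) (l : List Nat) :
    pairCount P (l.map g) = pairCount (fun a b => P (g a) (g b)) l := by
  induction l with
  | nil => rfl
  | cons x xs ih => simp [pairCount, List.countP_map, ih, Function.comp_def]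

theorem pairCount_getD_range (Q : Nat → Nat → Bool) (xs : List Nat) :
    pairCount (fun a b => Q (xs.getD a 0) (xs.getD b 0)) (List.range xs.length)
      = pairCount Q xs := by
  induction xs with
  | nil => rfl
  | cons x xs ih =>
      rw [List.length_cons, List.range_succ_eq_map]
      simp only [pairCount, List.countP_map, pairCount_map, Function.comp_def,
        List.getD_cons_zero, List.getD_cons_succ]
      rw [countP_getD_range, ih]

theorem sum_map_ite (K : List Int) (k0 : Int) (t : Nat) (hnd : K.Nodup) (hmem : k0 ∈ K) :
    (K.map (fun k => if k0 = k then t else 0)).sum = t := by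
  induction K with
  | nil => cases hmem
  | cons k K ih =>
      rcases List.mem_cons.mp hmem with h | h
      · subst h
        have : ∀ k' ∈ K, (if k0 = k' then t else 0) = 0 := by
          intro k' hk'
          have : k0 ≠ k' := fun he => (List.nodup_cons.mp hnd).1 (he ▸ hk')
          simp [this]
        simp [List.sum_eq_zero (by
          intro x hx
          rcases List.mem_map.mp hx with ⟨k', hk', rfl⟩
          exact this k' hk')]
      · have hne : k0 ≠ k := fun he => (List.nodup_cons.mp hnd).1 (he ▸ h)
        simp [hne, ih (List.nodup_cons.mp hnd).2 h]

theorem group_pairCount (c : Nat → Int) (E : Nat → Nat → Bool) :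
    ∀ (l : List Nat) (K : List Int), K.Nodup → (∀ i ∈ l, c i ∈ K) →
    (K.map (fun k => pairCount E (l.filter (fun i => c i == k)))).sum
      = pairCount (fun i j => (c i == c j) && E i j) l := by
  intro l
  induction l with
  | nil => intro K _ _; simp [pairCount, List.sum_eq_zero]
  | cons x xs ih =>
      intro K hnd hmem
      have hx : c x ∈ K := hmem x (List.mem_cons_self ..)
      have step : ∀ k ∈ K,
          pairCount E ((x :: xs).filter (fun i => c i == k))
            = pairCount E (xs.filter (fun i => c i == k))
              + (if c x = k then (xs.filter (fun i => c i == c x)).countP (E x) else 0) := by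
        intro k _
        by_cases h : c x = k
        · simp [h, pairCount]
          omega
        · simp [beq_iff_eq, h]
      calc (K.map (fun k => pairCount E ((x :: xs).filter (fun i => c i == k)))).sum
          = (K.map (fun k => pairCount E (xs.filter (fun i => c i == k))
              + (if c x = k then (xs.filter (fun i => c i == c x)).countP (E x) else 0))).sum := by
            exact congrArg List.sum (List.map_congr_left step)
        _ = (K.map (fun k => pairCount E (xs.filter (fun i => c i == k)))).sum
              + (K.map (fun k => if c x = k then (xs.filter (fun i => c i == c x)).countP (E x) else 0)).sum := by
            rw [← List.sum_map_add]
        _ = pairCount (fun i j => (c i == c j) && E i j) xs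
              + (xs.filter (fun i => c i == c x)).countP (E x) := by
            rw [ih K hnd (fun i hi => hmem i (List.mem_cons_of_mem _ hi)),
              sum_map_ite K (c x) _ hnd hx]
        _ = pairCount (fun i j => (c i == c j) && E i j) (x :: xs) := by
            simp only [pairCount, List.countP_filter]
            have : (fun j => E x j && (c j == c x)) = fun j => (c x == c j) && E x j := by
              funext j
              rw [Bool.and_comm, Bool.beq_comm]
            rw [this]
            omega

theorem foldl_add_cast (K : List Int) (F : Int → Int → Int) (g : Int → Nat) (acc : Int)
    (h : ∀ (a : Int) (k : Int), F a k = a + (g k : Int)) :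
    K.foldl F acc = acc + ((K.map g).sum : Int) := by
  induction K generalizing acc with
  | nil => simp
  | cons k K ih =>
      rw [List.foldl_cons, h, ih, List.map_cons, List.sum_cons]
      push_cast
      ring

theorem distinct_nodup (c : Nat → Int) :
    ∀ (l : List Nat) (ks : List Int), ks.Nodup →
      (l.foldl (fun ks i => if c i ∈ ks then ks else ks ++ [c i]) ks).Nodup := by
  intro l
  induction l with
  | nil => intro ks h; exact h
  | cons x xs ih =>
      intro ks h
      simp only [List.foldl_cons]
      by_cases hx : c x ∈ ks
      · simpa [hx] using ih ks h
      · have : (ks ++ [c x]).Nodup := by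
          simp [List.nodup_append, h]
          exact fun a ha he => hx (he ▸ ha)
        simpa [hx] using ih _ this

theorem distinct_sub (c : Nat → Int) :
    ∀ (l : List Nat) (ks : List Int),
      ks ⊆ l.foldl (fun ks i => if c i ∈ ks then ks else ks ++ [c i]) ks := by
  intro l
  induction l with
  | nil => intro ks; exact fun _ h => h
  | cons x xs ih =>
      intro ks
      simp only [List.foldl_cons]
      by_cases hx : c x ∈ ks
      · simpa [hx] using ih ks
      · simp only [hx, if_false]
        exact fun a ha => ih (ks ++ [c x]) (List.mem_append_left _ ha)

theorem distinct_mem (c : Nat → Int) :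
    ∀ (l : List Nat) (ks : List Int) (i : Nat), i ∈ l →
      c i ∈ l.foldl (fun ks i => if c i ∈ ks then ks else ks ++ [c i]) ks := by
  intro l
  induction l with
  | nil => intro ks i h; cases h
  | cons x xs ih =>
      intro ks i h
      simp only [List.foldl_cons]
      rcases List.mem_cons.mp h with rfl | h
      · by_cases hx : c i ∈ ks
        · simp only [hx, if_true]; exact distinct_sub c xs ks hx
        · simp only [hx, if_false]
          exact distinct_sub c xs _ (by simp)
      · by_cases hx : c x ∈ ks <;> simp only [hx, if_true, if_false] <;> exact ih _ i h

theorem main_eq (adj : List (List Int)) (color : List Int) :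
    f adj color = f_alt adj color := by
  have hA : f adj color
      = (pairCount (fun i j => ((adj.getD i []).getD j 0 != 0)
          && (color.getD i 0 == color.getD j 0)) (List.range adj.length) : Int) := by
    show (List.range adj.length).foldl (fun conflicts i =>
        (List.range' (i + 1) (adj.length - (i + 1))).foldl (fun conflicts j =>
          if ((adj.getD i []).getD j 0 != 0) && (color.getD i 0 == color.getD j 0)
          then conflicts + 1 else conflicts) conflicts) 0 = _
    rw [foldl_triangle_range, zero_add]
  have hB : ∀ (k : Int) (acc : Int),
      (List.range ((List.range adj.length).filter (fun i => color.getD i 0 == k)).length).foldl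
        (fun conflicts a =>
          (List.range' (a + 1)
              (((List.range adj.length).filter (fun i => color.getD i 0 == k)).length - (a + 1))).foldl
            (fun conflicts b =>
              if (adj.getD (((List.range adj.length).filter (fun i => color.getD i 0 == k)).getD a 0) []).getD
                  (((List.range adj.length).filter (fun i => color.getD i 0 == k)).getD b 0) 0 != 0
              then conflicts + 1 else conflicts) conflicts) acc
      = acc + (pairCount (fun i j => (adj.getD i []).getD j 0 != 0)
          ((List.range adj.length).filter (fun i => color.getD i 0 == k)) : Int) := by
    intro k acc
    rw [foldl_triangle_range,
      pairCount_getD_range (fun i j => (adj.getD i []).getD j 0 != 0)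
        ((List.range adj.length).filter (fun i => color.getD i 0 == k))]
  have hAlt : f_alt adj color
      = 0 + ((((List.range adj.length).foldl
            (fun ks i => if color.getD i 0 ∈ ks then ks else ks ++ [color.getD i 0]) []).map
          (fun k => pairCount (fun i j => (adj.getD i []).getD j 0 != 0)
            ((List.range adj.length).filter (fun i => color.getD i 0 == k)))).sum : Int) := by
    exact foldl_add_cast _ _ _ 0 (fun acc k => hB k acc)
  have hnd : ((List.range adj.length).foldl
      (fun ks i => if color.getD i 0 ∈ ks then ks else ks ++ [color.getD i 0]) []).Nodup :=
    distinct_nodup (fun i => color.getD i 0) (List.range adj.length) [] List.nodup_nil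
  have hmem : ∀ i ∈ List.range adj.length, color.getD i 0 ∈ (List.range adj.length).foldl
      (fun ks i => if color.getD i 0 ∈ ks then ks else ks ++ [color.getD i 0]) [] :=
    fun i hi => distinct_mem (fun i => color.getD i 0) (List.range adj.length) [] i hi
  have hG : (((List.range adj.length).foldl
        (fun ks i => if color.getD i 0 ∈ ks then ks else ks ++ [color.getD i 0]) []).map
      (fun k => pairCount (fun i j => (adj.getD i []).getD j 0 != 0)
        ((List.range adj.length).filter (fun i => color.getD i 0 == k)))).sum
      = pairCount (fun i j => (color.getD i 0 == color.getD j 0)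
          && ((adj.getD i []).getD j 0 != 0)) (List.range adj.length) :=
    group_pairCount (fun i => color.getD i 0) (fun i j => (adj.getD i []).getD j 0 != 0)
      (List.range adj.length) _ hnd hmem
  have hswap : pairCount (fun i j => ((adj.getD i []).getD j 0 != 0)
        && (color.getD i 0 == color.getD j 0)) (List.range adj.length)
      = pairCount (fun i j => (color.getD i 0 == color.getD j 0)
        && ((adj.getD i []).getD j 0 != 0)) (List.range adj.length) := by
    congr 1
    funext i j
    exact Bool.and_comm ..
  rw [hA, hAlt, zero_add]
  exact congrArg Nat.cast (hswap.trans hG.symm)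

-- ===== VERDICT (by name: the statement is the Claim_ definition above) =====
theorem f_spec : Claim_equal_f := by
  intro adj color _ _
  exact main_eq adj color
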